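-- pv_equiv track=rewrite | github.com/boarcoder/study-guide | leetcode/problems/word-problems/general/balance_str_t.py | is_balanced_str
-- ===== SOURCE A (Python) =====
-- def is_balanced_str(state):
--     ct = None
--     for ch in state["ch_ct_dic"]:
--         if state["ch_ct_dic"][ch] == 0:
--             continue
--         if ct is None:
--             ct = state["ch_ct_dic"][ch]
--             continue
--         if state["ch_ct_dic"][ch] != ct:
--             return False
--     return True
-- ===== SOURCE B (Python) =====
-- def is_balanced_str(state):
--     nz = [v for v in state["ch_ct_dic"].values() if v != 0]
--     return not nz or sum(nz) == len(nz) * max(nz)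
-- ===== Notes on version B (the rewrite author's own statement) =====
-- stated objective: alternative
-- what changed: Replaces the running-reference comparison loop with an arithmetic aggregate identity: the nonzero counts are all equal iff their sum equals their length times their maximum.
import Mathlib
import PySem

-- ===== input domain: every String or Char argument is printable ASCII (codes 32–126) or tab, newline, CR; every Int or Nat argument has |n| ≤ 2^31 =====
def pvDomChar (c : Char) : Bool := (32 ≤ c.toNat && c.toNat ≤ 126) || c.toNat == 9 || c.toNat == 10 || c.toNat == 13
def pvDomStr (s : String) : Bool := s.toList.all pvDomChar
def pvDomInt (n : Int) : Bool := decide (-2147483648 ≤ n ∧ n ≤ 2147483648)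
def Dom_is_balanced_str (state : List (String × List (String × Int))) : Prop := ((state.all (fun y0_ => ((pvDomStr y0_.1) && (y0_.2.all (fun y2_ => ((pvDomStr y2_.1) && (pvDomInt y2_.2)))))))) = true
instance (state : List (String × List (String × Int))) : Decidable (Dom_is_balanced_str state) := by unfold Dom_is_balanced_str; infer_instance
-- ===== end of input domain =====

-- B replaces A's running-reference comparison loop (with early return) by an arithmetic
-- aggregate identity: the nonzero counts are all equal iff sum = length * max (objective: alternative).

-- ===== PORT A =====
-- A's for-loop over the keys of state["ch_ct_dic"], carrying ct : Option Int ('ct is None' = none),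
-- with early 'return False'. Each key ch comes from dic.keys, so dic[ch] always succeeds; the
-- .getD 0 default is never used.
def isBalChLoop (dic : PySem.Dict String Int) : List String → Option Int → Bool
  | [], _ => true
  | ch :: rest, ct =>
    let v := (PySem.Dict.get? dic ch).getD 0
    if v == 0 then isBalChLoop dic rest ct
    else
      match ct with
      | none => isBalChLoop dic rest (some v)
      | some c => if v != c then false else isBalChLoop dic rest (some c)

def is_balanced_str (state : List (String × List (String × Int))) : Bool :=
  match (PySem.Dict.ofList state).get? "ch_ct_dic" with
  | none => false   -- Python raises KeyError here; excluded by Pre_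
  | some pairs =>
      let dic := PySem.Dict.ofList pairs
      isBalChLoop dic (PySem.Dict.keys dic) none

-- ===== PORT B =====
def is_balanced_str_alt (state : List (String × List (String × Int))) : Bool :=
  match (PySem.Dict.ofList state).get? "ch_ct_dic" with
  | none => false   -- Python raises KeyError here; excluded by Pre_
  | some pairs =>
      let nz := ((PySem.Dict.ofList pairs).values).filter (fun v => !(v == 0))
      match PySem.List.max? nz (fun v => v) with
      | none => true                                   -- 'not nz' : empty list
      | some m => nz.sum == (nz.length : Int) * m      -- sum(nz) == len(nz) * max(nz)

-- ===== PRECONDITION & SPEC =====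
-- Pre_: the state dict must contain the key "ch_ct_dic" (Python raises KeyError otherwise).
def Pre_is_balanced_str (state : List (String × List (String × Int))) : Prop :=
  "ch_ct_dic" ∈ state.map (·.1)
instance (state : List (String × List (String × Int))) : Decidable (Pre_is_balanced_str state) := by unfold Pre_is_balanced_str; infer_instance

def pvWitness_is_balanced_str : (List (String × List (String × Int))) :=
  [("ch_ct_dic", [("a", 2), ("b", 2), ("c", 0)])]

def Spec_is_balanced_str (state : List (String × List (String × Int))) (out : Bool) : Prop := out = is_balanced_str_alt state
instance (state : List (String × List (String × Int))) (out : Bool) : Decidable (Spec_is_balanced_str state out) := by unfold Spec_is_balanced_str; infer_instance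

-- ===== CLAIM (what is proved, stated in full; the proofs are below) =====
def Claim_equal_is_balanced_str : Prop := ∀ (state : List (String × List (String × Int))), Dom_is_balanced_str state → Pre_is_balanced_str state → Spec_is_balanced_str state (is_balanced_str state)

-- ===== LEMMAS AND PROOFS =====

-- A's loop over a bare list of values (proof helper: the loop after the key lookups are resolved).
def loopVals : List Int → Option Int → Bool
  | [], _ => true
  | v :: rest, ct =>
    if v == 0 then loopVals rest ct
    else
      match ct with
      | none => loopVals rest (some v)
      | some c => if v != c then false else loopVals rest (some c)

theorem isBalChLoop_eq_loopVals (dic : PySem.Dict String Int) :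
    ∀ (ks : List String) (ct : Option Int),
      isBalChLoop dic ks ct = loopVals (ks.map (fun k => dic.getD k 0)) ct := by
  intro ks
  induction ks with
  | nil => intro ct; rfl
  | cons ch rest ih =>
      intro ct
      simp only [isBalChLoop, loopVals, List.map, ← PySem.Dict.getD_eq_get?_getD]
      by_cases h0 : dic.getD ch 0 = 0
      · simp [h0, ih]
      · simp only [beq_iff_eq, h0]
        cases ct with
        | none => simp [ih]
        | some c => by_cases hc : dic.getD ch 0 = c <;> simp [hc, ih]

theorem loopVals_some_iff (vs : List Int) (c : Int) :
    loopVals vs (some c) = true ↔ ∀ v ∈ vs, v ≠ 0 → v = c := by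
  induction vs with
  | nil => simp [loopVals]
  | cons v rest ih =>
      by_cases h0 : v = 0
      · rw [show loopVals (v :: rest) (some c) = loopVals rest (some c) by
          simp [loopVals, h0], ih]
        constructor
        · intro h x hx hxne
          rw [List.mem_cons] at hx
          rcases hx with hx | hx
          · exact absurd (hx.trans h0) hxne
          · exact h x hx hxne
        · intro h x hx hxne
          exact h x (List.mem_cons_of_mem _ hx) hxne
      · by_cases hc : v = c
        · rw [show loopVals (v :: rest) (some c) = loopVals rest (some c) by
            simp [loopVals, hc], ih]
          constructor
          · intro h x hx hxne
            rw [List.mem_cons] at hx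
            rcases hx with hx | hx
            · exact hx.trans hc
            · exact h x hx hxne
          · intro h x hx hxne
            exact h x (List.mem_cons_of_mem _ hx) hxne
        · rw [show loopVals (v :: rest) (some c) = false by
            simp [loopVals, h0, hc]]
          simp only [Bool.false_eq_true, false_iff, not_forall]
          exact ⟨v, List.mem_cons_self, h0, hc⟩

theorem loopVals_none_iff (vs : List Int) :
    loopVals vs none = true ↔ ∀ v ∈ vs, ∀ w ∈ vs, v ≠ 0 → w ≠ 0 → v = w := by
  induction vs with
  | nil => simp [loopVals]
  | cons v rest ih =>
      by_cases h0 : v = 0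
      · rw [show loopVals (v :: rest) none = loopVals rest none by
          simp [loopVals, h0], ih]
        constructor
        · intro h x hx y hy hxne hyne
          rw [List.mem_cons] at hx hy
          rcases hx with hx | hx
          · exact absurd (hx.trans h0) hxne
          · rcases hy with hy | hy
            · exact absurd (hy.trans h0) hyne
            · exact h x hx y hy hxne hyne
        · intro h x hx y hy hxne hyne
          exact h x (List.mem_cons_of_mem _ hx) y (List.mem_cons_of_mem _ hy) hxne hyne
      · rw [show loopVals (v :: rest) none = loopVals rest (some v) by
          simp [loopVals, h0], loopVals_some_iff]
        constructor
        · intro h x hx y hy hxne hyne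
          rw [List.mem_cons] at hx hy
          rcases hx with hx | hx <;> rcases hy with hy | hy
          · rw [hx, hy]
          · rw [hx]; exact (h y hy hyne).symm
          · rw [hy]; exact h x hx hxne
          · exact (h x hx hxne).trans (h y hy hyne).symm
        · intro h x hx hxne
          exact h x (List.mem_cons_of_mem _ hx) v List.mem_cons_self hxne h0

theorem sum_le_len_mul (l : List Int) (m : Int) (hub : ∀ v ∈ l, v ≤ m) :
    l.sum ≤ (l.length : Int) * m := by
  induction l with
  | nil => simp
  | cons a t ih =>
      have h1 : t.sum ≤ (t.length : Int) * m := ih (fun v hv => hub v (List.mem_cons_of_mem _ hv))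
      have h2 : a ≤ m := hub a List.mem_cons_self
      have h3 : ((t.length + 1 : Int)) * m = (t.length : Int) * m + m := by ring
      simp only [List.sum_cons, List.length_cons]
      push_cast
      omega

theorem sum_eq_len_mul_iff (l : List Int) (m : Int) (hub : ∀ v ∈ l, v ≤ m) :
    l.sum = (l.length : Int) * m ↔ ∀ v ∈ l, v = m := by
  induction l with
  | nil => simp
  | cons a t ih =>
      have hub' : ∀ v ∈ t, v ≤ m := fun v hv => hub v (List.mem_cons_of_mem _ hv)
      have h1 : t.sum ≤ (t.length : Int) * m := sum_le_len_mul t m hub'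
      have h2 : a ≤ m := hub a List.mem_cons_self
      have h3 : ((t.length + 1 : Int)) * m = (t.length : Int) * m + m := by ring
      simp only [List.sum_cons, List.length_cons]
      constructor
      · intro h
        push_cast at h
        have ha : a = m ∧ t.sum = (t.length : Int) * m := by constructor <;> omega
        intro v hv
        rcases List.mem_cons.mp hv with hv | hv
        · rw [hv]; exact ha.1
        · exact ((ih hub').mp ha.2) v hv
      · intro h
        have ha : a = m := h a List.mem_cons_self
        have ht : t.sum = (t.length : Int) * m :=
          (ih hub').mpr (fun v hv => h v (List.mem_cons_of_mem _ hv))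
        push_cast
        omega

theorem loopVals_eq_sum_check (vs : List Int) :
    loopVals vs none =
      (match PySem.List.max? (vs.filter (fun v => !(v == 0))) (fun v => v) with
       | none => true
       | some m => (vs.filter (fun v => !(v == 0))).sum ==
           (((vs.filter (fun v => !(v == 0))).length : Int)) * m) := by
  set nz := vs.filter (fun v => !(v == 0)) with hnz
  cases hmx : PySem.List.max? nz (fun v => v) with
  | none =>
      have hempty : nz = [] := (PySem.List.max?_eq_none_iff _ _).mp hmx

      simp only
      rw [loopVals_none_iff]
      intro v hv w hw hvne hwne
      exfalso
      have hvnz : v ∈ nz := by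
        rw [hnz]; exact List.mem_filter.mpr ⟨hv, by simpa using hvne⟩
      rw [hempty] at hvnz
      exact absurd hvnz (List.not_mem_nil)
  | some m =>
      have hmem : m ∈ nz := PySem.List.max?_mem hmx
      have hub : ∀ v ∈ nz, v ≤ m := fun v hv => PySem.List.max?_isMax hmx v hv

      simp only
      rw [Bool.eq_iff_iff, loopVals_none_iff, beq_iff_eq,
        sum_eq_len_mul_iff nz m hub]
      constructor
      · intro h v hv
        have hv' : v ∈ vs := (List.mem_filter.mp (hnz ▸ hv)).1
        have hvne : v ≠ 0 := by
          have := (List.mem_filter.mp (hnz ▸ hv)).2; simpa using this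
        have hm' : m ∈ vs := (List.mem_filter.mp (hnz ▸ hmem)).1
        have hmne : m ≠ 0 := by
          have := (List.mem_filter.mp (hnz ▸ hmem)).2; simpa using this
        exact h v hv' m hm' hvne hmne
      · intro h v hv w hw hvne hwne
        have h1 : v = m := h v (hnz ▸ List.mem_filter.mpr ⟨hv, by simpa using hvne⟩)
        have h2 : w = m := h w (hnz ▸ List.mem_filter.mpr ⟨hw, by simpa using hwne⟩)
        rw [h1, h2]

-- ===== VERDICT (by name: the statement is the Claim_ definition above) =====
theorem is_balanced_str_spec : Claim_equal_is_balanced_str := by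
  intro state _ _
  unfold Spec_is_balanced_str is_balanced_str is_balanced_str_alt
  cases hget : (PySem.Dict.ofList state).get? "ch_ct_dic" with
  | none => rfl
  | some pairs =>
      simp only
      rw [isBalChLoop_eq_loopVals,
        PySem.Dict.values_eq_map_keys _ (PySem.Dict.nodup_keys_ofList pairs) 0,
        loopVals_eq_sum_check]
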